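-- pv_equiv track=rewrite | github.com/tiggerwu/Learning-Material | 人工智能理论与应用/Homework2/agent.py | ver_eval
-- ===== SOURCE A (Python) =====
-- def ver_eval(my_pos, player):
--     #considering that the column is not the same this eval can be more accurate
--     partial_eval = 0
--     assert player == 1 or player == 2, 'player number is incorrect!!'
--     if player == 2:
--         for chess in my_pos:
--             partial_eval += chess[0]
--
--     else:
--         for chess in my_pos:
--             partial_eval += 20 - chess[0]
--
--     return partial_eval
-- ===== SOURCE B (Python) =====
-- def ver_eval(my_pos, player):
--     assert player == 1 or player == 2, 'player number is incorrect!!'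
--     # histogram of row coordinates, then a weighted sum over distinct rows
--     cnt = {}
--     for chess in my_pos:
--         cnt[chess[0]] = cnt.get(chess[0], 0) + 1
--     total = 0
--     for row, k in cnt.items():
--         total += (row if player == 2 else 20 - row) * k
--     return total
-- ===== Notes on version B (the rewrite author's own statement) =====
-- stated objective: alternative
-- what changed: Replaces A's per-element conditional accumulation loop by a two-stage histogram algorithm: build a frequency dict of row coordinates, then sum weight(row)*count over the distinct rows.
import Mathlib
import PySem

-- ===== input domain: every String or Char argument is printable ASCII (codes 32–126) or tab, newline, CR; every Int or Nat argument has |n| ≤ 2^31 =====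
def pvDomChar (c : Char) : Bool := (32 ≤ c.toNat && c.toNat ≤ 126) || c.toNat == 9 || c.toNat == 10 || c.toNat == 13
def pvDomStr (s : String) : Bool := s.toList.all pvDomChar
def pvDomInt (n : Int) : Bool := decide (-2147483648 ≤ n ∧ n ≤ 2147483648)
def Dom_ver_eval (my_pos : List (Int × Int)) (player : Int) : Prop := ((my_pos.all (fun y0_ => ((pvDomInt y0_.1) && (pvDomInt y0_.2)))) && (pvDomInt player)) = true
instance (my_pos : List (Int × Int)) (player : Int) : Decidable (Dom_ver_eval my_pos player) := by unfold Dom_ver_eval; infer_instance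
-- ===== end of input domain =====

-- B replaces A's per-element conditional accumulation by a two-stage histogram algorithm
-- (frequency dict of row coordinates, then a weighted sum over distinct rows); objective: alternative.

-- ===== PORT A =====
def ver_eval (my_pos : List (Int × Int)) (player : Int) : Int :=
  -- partial_eval = 0; branch on player, accumulate over my_pos
  if player == 2 then
    my_pos.foldl (fun partial_eval chess => partial_eval + chess.1) 0
  else
    my_pos.foldl (fun partial_eval chess => partial_eval + (20 - chess.1)) 0

-- ===== PORT B =====
def ver_eval_alt (my_pos : List (Int × Int)) (player : Int) : Int :=
  -- cnt = {}; for chess in my_pos: cnt[chess[0]] = cnt.get(chess[0], 0) + 1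
  let cnt : PySem.Dict Int Int :=
    my_pos.foldl (fun d chess => d.insert chess.1 (d.getD chess.1 0 + 1)) PySem.Dict.empty
  -- total = 0; for row, k in cnt.items(): total += (row if player == 2 else 20 - row) * k
  cnt.items.foldl (fun total rk => total + (if player == 2 then rk.1 else 20 - rk.1) * rk.2) 0

-- ===== PRECONDITION & SPEC =====
-- Pre_ excludes inputs where the assert fails (both A and B raise AssertionError there).
def Pre_ver_eval (my_pos : List (Int × Int)) (player : Int) : Prop := player = 1 ∨ player = 2
instance (my_pos : List (Int × Int)) (player : Int) : Decidable (Pre_ver_eval my_pos player) := by unfold Pre_ver_eval; infer_instance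
def pvWitness_ver_eval : (List (Int × Int)) × Int := ([(3, 4), (7, 1)], 1)

def Spec_ver_eval (my_pos : List (Int × Int)) (player : Int) (out : Int) : Prop := out = ver_eval_alt my_pos player
instance (my_pos : List (Int × Int)) (player : Int) (out : Int) : Decidable (Spec_ver_eval my_pos player out) := by unfold Spec_ver_eval; infer_instance

-- ===== CLAIM =====
def Claim_equal_ver_eval : Prop := ∀ (my_pos : List (Int × Int)) (player : Int), Dom_ver_eval my_pos player → Pre_ver_eval my_pos player → Spec_ver_eval my_pos player (ver_eval my_pos player)

-- ===== LEMMAS AND PROOFS =====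

-- sum of an indicator over a nodup list
theorem sum_map_indicator (w : Int → Int) (x : Int) (m : List Int) (hm : m.Nodup) :
    (m.map (fun k => if k = x then w k else 0)).sum = if x ∈ m then w x else 0 := by
  induction m with
  | nil => simp
  | cons a t ih =>
    rcases List.nodup_cons.mp hm with ⟨ha, ht⟩
    by_cases hax : a = x
    · have hx : x ∉ t := hax ▸ ha
      simp [List.map_cons, List.sum_cons, ih ht, hax, hx, List.mem_cons]
    · have hxa : x ≠ a := fun h => hax h.symm
      simp [List.map_cons, List.sum_cons, if_neg hax, ih ht, List.mem_cons, hxa]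

-- weighted count-sum over a nodup index list equals the plain sum over the filtered list
theorem weighted_count_sum (w : Int → Int) (m : List Int) (hm : m.Nodup) (l : List Int) :
    (m.map (fun k => w k * (l.count k : Int))).sum
      = ((l.filter (fun x => decide (x ∈ m))).map w).sum := by
  induction l with
  | nil => simp
  | cons x t ih =>
    have hsplit : (m.map (fun k => w k * ((x :: t).count k : Int))).sum
        = (m.map (fun k => w k * (t.count k : Int))).sum
          + (m.map (fun k => if k = x then w k else 0)).sum := by
      rw [← List.sum_map_add]
      congr 1
      apply List.map_congr_left
      intro k _
      by_cases hk : k = x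
      · subst hk; simp; ring
      · have hk' : ¬ x = k := fun h => hk h.symm
        simp [hk, hk']
    rw [hsplit, ih, sum_map_indicator w x m hm]
    by_cases hx : x ∈ m
    · simp [hx, add_comm]
    · simp [hx]

-- the full histogram identity: Σ_{k ∈ distinct rows} w k * count k = Σ_{x ∈ rows} w x
theorem histogram_sum (w : Int → Int) (l : List Int) :
    ((PySem.Set.ofList l).map (fun k => w k * (l.count k : Int))).sum = (l.map w).sum := by
  rw [weighted_count_sum w _ (PySem.Set.nodup_ofList l) l]
  have hf : l.filter (fun x => decide (x ∈ PySem.Set.ofList l)) = l := by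
    apply List.filter_eq_self.mpr
    intro x hx
    simpa [PySem.Set.mem_ofList] using hx
  rw [hf]

theorem foldl_add_sum (l : List (Int × Int)) (a : Int) (g : (Int × Int) → Int) :
    l.foldl (fun p c => p + g c) a = a + (l.map g).sum := by
  induction l generalizing a with
  | nil => simp
  | cons h t ih => simp [List.foldl, ih]; ring

-- B's value as a plain weighted sum over my_pos
theorem ver_eval_alt_eq (my_pos : List (Int × Int)) (player : Int) :
    ver_eval_alt my_pos player
      = (my_pos.map (fun chess => (if player == 2 then chess.1 else 20 - chess.1))).sum := by
  have h0 : ver_eval_alt my_pos player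
      = ((my_pos.foldl (fun d chess => d.insert chess.1 (d.getD chess.1 0 + 1))
          PySem.Dict.empty).items.foldl
            (fun total rk => total + (if player == 2 then rk.1 else 20 - rk.1) * rk.2) 0) := rfl
  have hfold : my_pos.foldl (fun d chess => d.insert chess.1 (d.getD chess.1 0 + 1)) PySem.Dict.empty
      = PySem.Dict.counter (my_pos.map (fun chess => chess.1)) := by
    rw [← PySem.Dict.foldl_insert_getD_add_one_eq_counter, List.foldl_map]
  rw [h0, hfold,
      foldl_add_sum _ 0 (fun rk : Int × Int => (if player == 2 then rk.1 else 20 - rk.1) * rk.2),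
      PySem.Dict.items_counter, List.map_map, zero_add]
  simp only [Function.comp_def]
  rw [histogram_sum (fun r => if player == 2 then r else 20 - r) (my_pos.map (fun chess => chess.1)),
      List.map_map]
  simp only [Function.comp_def]

-- ===== VERDICT =====
theorem ver_eval_spec : Claim_equal_ver_eval := by
  intro my_pos player _ _
  unfold Spec_ver_eval
  rw [ver_eval_alt_eq]
  unfold ver_eval
  by_cases h : player = 2
  · simp [h, foldl_add_sum]
  · have hb : (player == 2) = false := by simp [h]
    simp only [hb, if_false, Bool.false_eq_true]
    rw [foldl_add_sum, zero_add]
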